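-- pv_equiv track=rewrite | github.com/roadbusta/aoc_python_lewagon | aoc_23/day_01.py | true_cal_num
-- ===== SOURCE A (Python) =====
-- def true_cal_num(cal_str: str) -> str:
--     """ Takes in a calibration string, and returns the entire number
--     """
--     search_list = ['zero', 'one', 'two','three', 'four', 'five', 'six', 'seven',
--                    'eight', 'nine','0','1','2','3','4','5','6','7','8','9']
--     # Number dictionary
--     num_dict = {
--     'zero':'0',
--     'one':'1',
--     'two':'2',
--     'three':'3',
--     'four':'4',
--     'five':'5',
--     'six':'6',
--     'seven':'7',
--     'eight':'8',
--     'nine':'9'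
--     }
--     # Create an empty search dictionary
--     search_dict = {}
--     for test_sub in search_list:
--         res = [i for i in range(len(cal_str)) if cal_str.startswith(test_sub, i)]
--         search_dict[test_sub] = res
--
--
--     # clean the dictionary
--     clean_dict = dict(search_dict)
--     for key, value in search_dict.items():
--         if len(value)==0:
--             clean_dict.pop(key)
--
--     # invert the dictionary
--     inv_dict = {}
--     for key, value in clean_dict.items():
--         for v in value:
--             if key in num_dict.keys():
--                 key = num_dict[key]
--
--             inv_dict[v] = key
--
--     # Sort the dictionary
--     sorted_dict = {k: v for k, v in sorted(inv_dict.items(), key=lambda item: item[0])}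
--
--     # Extract numbers into a list
--     number_list = [v for k,v in sorted_dict.items()]
--
--     #Join to a string and strip
--     number_string = "".join(number_list).strip()
--
--     return number_string
-- ===== SOURCE B (Python) =====
-- def true_cal_num(cal_str: str) -> str:
--     """Single left-to-right scan: at each index append the digit char, or the
--     digit of the (unique) spelled-out number word starting there."""
--     words = (('zero', '0'), ('one', '1'), ('two', '2'), ('three', '3'),
--              ('four', '4'), ('five', '5'), ('six', '6'), ('seven', '7'),
--              ('eight', '8'), ('nine', '9'))
--     out = []
--     for i, c in enumerate(cal_str):
--         if '0' <= c <= '9':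
--             out.append(c)
--         else:
--             for w, d in words:
--                 if cal_str.startswith(w, i):
--                     out.append(d)
--                     break
--     return ''.join(out)
-- ===== Notes on version B (the rewrite author's own statement) =====
-- stated objective: faster
-- what changed: Replaced the 20-pattern index-collection dicts plus invert/sort/join pipeline by one left-to-right scan that appends the digit (or the digit of the unique number word) found at each index, so no dictionaries and no sort are built.
import Mathlib
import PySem

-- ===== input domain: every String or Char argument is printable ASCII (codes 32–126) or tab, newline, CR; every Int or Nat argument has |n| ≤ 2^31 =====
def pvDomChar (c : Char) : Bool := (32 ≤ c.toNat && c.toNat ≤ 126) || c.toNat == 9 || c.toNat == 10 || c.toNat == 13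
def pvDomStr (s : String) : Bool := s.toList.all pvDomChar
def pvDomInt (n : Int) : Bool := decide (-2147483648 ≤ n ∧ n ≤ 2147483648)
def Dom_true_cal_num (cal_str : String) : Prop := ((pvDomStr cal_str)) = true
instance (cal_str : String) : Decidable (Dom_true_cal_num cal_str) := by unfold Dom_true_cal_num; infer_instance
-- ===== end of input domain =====

-- B replaces A's 20-pattern occurrence-dict + invert + sort pipeline by one left-to-right
-- scan appending each position's digit in order; same return value on every input.


-- ===== PORT A =====
-- A's search_list; patterns kept as List Char (both ports work on cal_str.toList throughout)
def pvSearchList : List (List Char) :=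
  ["zero".toList, "one".toList, "two".toList, "three".toList, "four".toList,
   "five".toList, "six".toList, "seven".toList, "eight".toList, "nine".toList,
   "0".toList, "1".toList, "2".toList, "3".toList, "4".toList,
   "5".toList, "6".toList, "7".toList, "8".toList, "9".toList]

-- A's num_dict
def pvNumDict : PySem.Dict (List Char) (List Char) :=
  PySem.Dict.ofList
    [("zero".toList, "0".toList), ("one".toList, "1".toList), ("two".toList, "2".toList),
     ("three".toList, "3".toList), ("four".toList, "4".toList), ("five".toList, "5".toList),
     ("six".toList, "6".toList), ("seven".toList, "7".toList), ("eight".toList, "8".toList),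
     ("nine".toList, "9".toList)]

-- res = [i for i in range(len(cal_str)) if cal_str.startswith(test_sub, i)];
-- cal_str.startswith(test_sub, i) with 0 ≤ i is exactly: test_sub is a prefix of cal_str[i:];
-- the indices produced by range(len(cal_str)) are nonnegative, kept as Nat.
def idxsA (cs p : List Char) : List Nat :=
  (List.range cs.length).filter (fun i => PySem.Chars.startswith (cs.drop i) p)

-- 'if key in num_dict.keys(): key = num_dict[key]' (rebinds per inner step; recomputing it from
-- kv.1 each step is the same value since num_dict's values are not num_dict keys)
def convKey (p : List Char) : List Char :=
  match pvNumDict.get? p with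
  | some v => v
  | none => p

-- search_dict
def pvSearchDict (cs : List Char) : PySem.Dict (List Char) (List Nat) :=
  pvSearchList.foldl (fun d p => d.insert p (idxsA cs p)) PySem.Dict.empty

-- clean_dict
def pvCleanDict (cs : List Char) : PySem.Dict (List Char) (List Nat) :=
  (pvSearchDict cs).items.foldl
    (fun d kv => if kv.2.length = 0 then d.erase kv.1 else d) (pvSearchDict cs)

-- inv_dict
def pvInvDict (cs : List Char) : PySem.Dict Nat (List Char) :=
  (pvCleanDict cs).items.foldl
    (fun d kv => kv.2.foldl (fun d i => d.insert i (convKey kv.1)) d) PySem.Dict.empty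

-- sorted_dict / number_list / join / strip
def true_cal_num (cal_str : String) : String :=
  String.ofList (PySem.Chars.strip (PySem.Chars.join []
    ((PySem.List.sorted (pvInvDict cal_str.toList).items (fun kv => kv.1) false).map
      (fun kv => kv.2))))

-- ===== PORT B =====
-- B's words tuple
def pvWordDigits : List (List Char × Char) :=
  [("zero".toList, '0'), ("one".toList, '1'), ("two".toList, '2'), ("three".toList, '3'),
   ("four".toList, '4'), ("five".toList, '5'), ("six".toList, '6'), ("seven".toList, '7'),
   ("eight".toList, '8'), ("nine".toList, '9')]

-- the inner "for w, d in words: if cal_str.startswith(w, i): out.append(d); break"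
def altWordAt (t : List Char) : Option Char :=
  (pvWordDigits.find? (fun wd => PySem.Chars.startswith t wd.1)).map (fun wd => wd.2)

-- the "for i, c in enumerate(cal_str)" loop; position i ↔ the suffix cal_str[i:]
def altScan : List Char → List Char
  | [] => []
  | c :: rest =>
    if '0' ≤ c ∧ c ≤ '9' then c :: altScan rest
    else match altWordAt (c :: rest) with
      | some d => d :: altScan rest
      | none => altScan rest

def true_cal_num_alt (cal_str : String) : String := String.ofList (altScan cal_str.toList)

-- ===== PRECONDITION & SPEC =====
def Spec_true_cal_num (cal_str : String) (out : String) : Prop := out = true_cal_num_alt cal_str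
instance (cal_str : String) (out : String) : Decidable (Spec_true_cal_num cal_str out) := by unfold Spec_true_cal_num; infer_instance

-- ===== CLAIM (what is proved, stated in full; the proofs are below) =====
def Claim_equal_true_cal_num : Prop := ∀ (cal_str : String), Dom_true_cal_num cal_str → Spec_true_cal_num cal_str (true_cal_num cal_str)

-- ===== LEMMAS AND PROOFS =====

-- B's per-position decision as a function of the suffix
def matchAt (t : List Char) : Option Char :=
  match t with
  | [] => none
  | c :: rest => if '0' ≤ c ∧ c ≤ '9' then some c else altWordAt (c :: rest)

-- the in-order item list both pipelines boil down to
def canonA (cs : List Char) : List (Nat × List Char) :=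
  (List.range cs.length).filterMap (fun i => (matchAt (cs.drop i)).map (fun c => (i, [c])))

-- the flattened insertion list of A's inv_dict loop
def pairsA (cs : List Char) : List (Nat × List Char) :=
  pvSearchList.flatMap (fun p => (idxsA cs p).map (fun i => (i, convKey p)))

-- ---- small decidable facts about the two literal tables ----

lemma pf_free : ∀ p ∈ pvSearchList, ∀ q ∈ pvSearchList, p.isPrefixOf q = true → p = q := by decide

lemma sl_nodup : pvSearchList.Nodup := by decide

lemma word_first : ∀ wd ∈ pvWordDigits, wd.1 ∈ pvSearchList := by decide

lemma word_conv : ∀ wd ∈ pvWordDigits, convKey wd.1 = [wd.2] := by decide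

lemma word_digit : ∀ wd ∈ pvWordDigits, '0' ≤ wd.2 ∧ wd.2 ≤ '9' := by decide

lemma word_inj : ∀ a ∈ pvWordDigits, ∀ b ∈ pvWordDigits, a.1 = b.1 → a = b := by decide

lemma sl_cases : ∀ p ∈ pvSearchList,
    (∃ wd ∈ pvWordDigits, p = wd.1) ∨ (∃ c, p = [c] ∧ '0' ≤ c ∧ c ≤ '9') := by
  intro p hp
  fin_cases hp <;>
    first
      | exact Or.inl (by decide)
      | exact Or.inr ⟨_, rfl, by decide, by decide⟩

-- ---- digits ----

lemma digit_cases (c : Char) (h1 : '0' ≤ c) (h2 : c ≤ '9') :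
    c = '0' ∨ c = '1' ∨ c = '2' ∨ c = '3' ∨ c = '4' ∨
    c = '5' ∨ c = '6' ∨ c = '7' ∨ c = '8' ∨ c = '9' := by
  rw [Char.le_def, UInt32.le_iff_toNat_le] at h1 h2
  have hl : 48 ≤ c.toNat := h1
  have hr : c.toNat ≤ 57 := h2
  have h3 : c.toNat = 48 ∨ c.toNat = 49 ∨ c.toNat = 50 ∨ c.toNat = 51 ∨ c.toNat = 52 ∨
      c.toNat = 53 ∨ c.toNat = 54 ∨ c.toNat = 55 ∨ c.toNat = 56 ∨ c.toNat = 57 := by omega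
  have hc := (Char.ofNat_toNat c).symm
  rcases h3 with h|h|h|h|h|h|h|h|h|h <;> rw [h] at hc <;> simp [hc]

lemma digit_fact (c : Char) (h1 : '0' ≤ c) (h2 : c ≤ '9') :
    [c] ∈ pvSearchList ∧ convKey [c] = [c] := by
  rcases digit_cases c h1 h2 with rfl|rfl|rfl|rfl|rfl|rfl|rfl|rfl|rfl|rfl <;>
    exact ⟨by decide, by decide⟩

-- ---- at most one pattern matches a given suffix ----

lemma uniq_match {t p q : List Char} (hp : p ∈ pvSearchList) (hq : q ∈ pvSearchList)
    (h1 : PySem.Chars.startswith t p = true) (h2 : PySem.Chars.startswith t q = true) :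
    p = q := by
  have h1' : p <+: t := List.isPrefixOf_iff_prefix.mp h1
  have h2' : q <+: t := List.isPrefixOf_iff_prefix.mp h2
  rcases List.prefix_or_prefix_of_prefix h1' h2' with h | h
  · exact pf_free p hp q hq (List.isPrefixOf_iff_prefix.mpr h)
  · exact (pf_free q hq p hp (List.isPrefixOf_iff_prefix.mpr h)).symm

-- ---- matchAt vs the matching pattern ----

lemma altWordAt_of_match {t : List Char} {wd : List Char × Char} (hwd : wd ∈ pvWordDigits)
    (h : PySem.Chars.startswith t wd.1 = true) : altWordAt t = some wd.2 := by
  have hs : (pvWordDigits.find? (fun x => PySem.Chars.startswith t x.1)).isSome := by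
    rw [List.find?_isSome]; exact ⟨wd, hwd, h⟩
  obtain ⟨wd', hfind⟩ := Option.isSome_iff_exists.mp hs
  have hsat := List.find?_some hfind
  have hmem := List.mem_of_find?_eq_some hfind
  have he : wd'.1 = wd.1 := uniq_match (word_first _ hmem) (word_first _ hwd) hsat h
  have : wd' = wd := word_inj _ hmem _ hwd he
  subst this
  simp [altWordAt, hfind]

lemma matchAt_of_match {t p : List Char} (hp : p ∈ pvSearchList)
    (h : PySem.Chars.startswith t p = true) :
    ∃ c, matchAt t = some c ∧ convKey p = [c] := by
  cases t with
  | nil =>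
    cases p with
    | nil => exact absurd hp (by decide)
    | cons a l => simp [PySem.Chars.startswith, List.isPrefixOf] at h
  | cons c rest =>
    by_cases hd : '0' ≤ c ∧ c ≤ '9'
    · have hcs : PySem.Chars.startswith (c :: rest) [c] = true := by
        simp [PySem.Chars.startswith, List.isPrefixOf]
      have hf := digit_fact c hd.1 hd.2
      have hpq : p = [c] := uniq_match hp hf.1 h hcs
      exact ⟨c, by simp [matchAt, hd], hpq ▸ hf.2⟩
    · rcases sl_cases p hp with ⟨wd, hwd, rfl⟩ | ⟨c', rfl, hc1, hc2⟩
      · exact ⟨wd.2, by simp [matchAt, hd, altWordAt_of_match hwd h], word_conv wd hwd⟩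
      · have : c' = c := by
          simpa [PySem.Chars.startswith, List.isPrefixOf] using h
        subst this
        exact absurd ⟨hc1, hc2⟩ hd

lemma matchAt_some {t : List Char} {c : Char} (h : matchAt t = some c) :
    ∃ p ∈ pvSearchList, PySem.Chars.startswith t p = true ∧ convKey p = [c] := by
  cases t with
  | nil => simp [matchAt] at h
  | cons a rest =>
    by_cases hd : '0' ≤ a ∧ a ≤ '9'
    · have : a = c := by simpa [matchAt, hd] using h
      subst this
      have hf := digit_fact a hd.1 hd.2
      exact ⟨[a], hf.1, by simp [PySem.Chars.startswith, List.isPrefixOf], hf.2⟩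
    · have h' : altWordAt (a :: rest) = some c := by simpa [matchAt, hd] using h
      obtain ⟨wd, hfind, hsnd⟩ : ∃ wd, pvWordDigits.find?
          (fun x => PySem.Chars.startswith (a :: rest) x.1) = some wd ∧ wd.2 = c := by
        simpa [altWordAt, Option.map_eq_some_iff] using h'
      have hmem := List.mem_of_find?_eq_some hfind
      have hsat := List.find?_some hfind
      exact ⟨wd.1, word_first _ hmem, hsat, hsnd ▸ word_conv wd hmem⟩

lemma matchAt_digit {t : List Char} {c : Char} (h : matchAt t = some c) :
    '0' ≤ c ∧ c ≤ '9' := by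
  cases t with
  | nil => simp [matchAt] at h
  | cons a rest =>
    by_cases hd : '0' ≤ a ∧ a ≤ '9'
    · have : a = c := by simpa [matchAt, hd] using h
      exact this ▸ hd
    · have h' : altWordAt (a :: rest) = some c := by simpa [matchAt, hd] using h
      obtain ⟨wd, hfind, hsnd⟩ : ∃ wd, pvWordDigits.find?
          (fun x => PySem.Chars.startswith (a :: rest) x.1) = some wd ∧ wd.2 = c := by
        simpa [altWordAt, Option.map_eq_some_iff] using h'
      exact hsnd ▸ word_digit wd (List.mem_of_find?_eq_some hfind)

-- ---- A's dict pipeline, step by step ----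

lemma items_searchDict (cs : List Char) :
    (pvSearchDict cs).items = pvSearchList.map (fun p => (p, idxsA cs p)) := by
  have h := PySem.Dict.items_foldl_insert_fresh pvSearchList (fun p => p)
    (fun p => idxsA cs p) (PySem.Dict.empty)
    (fun a _ => PySem.Dict.contains_empty a)
    (by simpa using sl_nodup)
  simpa [pvSearchDict] using h

lemma items_foldl_erase {κ ν α : Type} [BEq κ] (key : α → κ) :
    ∀ (l : List α) (d : PySem.Dict κ ν),
      (l.foldl (fun d a => d.erase (key a)) d).items
        = d.items.filter (fun p => !(l.map key).contains p.1) := by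
  intro l
  induction l with
  | nil => intro d; simp
  | cons a l ih =>
    intro d
    rw [List.foldl_cons, ih]
    have he : (d.erase (key a)).items = d.items.filter (fun p => !(p.1 == key a)) := rfl
    rw [he, List.filter_filter]
    apply List.filter_congr
    intro x _
    simp [List.contains_cons, Bool.not_or, Bool.and_comm]

lemma items_cleanDict (cs : List Char) :
    (pvCleanDict cs).items
      = (pvSearchDict cs).items.filter (fun p =>
          !(((pvSearchDict cs).items.filter (fun kv => decide (kv.2.length = 0))).map
              Prod.fst).contains p.1) := by
  unfold pvCleanDict
  have h := PySem.List.foldl_ite_eq_foldl_filter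
    (p := fun kv : List Char × List Nat => kv.2.length = 0)
    (fun d kv => d.erase kv.1) ((pvSearchDict cs).items) (pvSearchDict cs)
  rw [h]
  exact items_foldl_erase Prod.fst _ _

-- a filtered-out entry of clean_dict has an empty occurrence list
lemma dropped_empty (cs : List Char) {x : List Char × List Nat}
    (hx : x ∈ (pvSearchDict cs).items)
    (hb : (!(((pvSearchDict cs).items.filter (fun kv => decide (kv.2.length = 0))).map
        Prod.fst).contains x.1) = false) : x.2 = [] := by
  rw [Bool.not_eq_false'] at hb
  have hb' := List.mem_of_elem_eq_true hb
  obtain ⟨kv, hkv, hfst⟩ := List.mem_map.mp hb'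
  have hkv' := List.mem_filter.mp hkv
  rw [items_searchDict] at hx
  obtain ⟨p, _, rfl⟩ := List.mem_map.mp hx
  rw [items_searchDict] at hkv'
  obtain ⟨q, _, rfl⟩ := List.mem_map.mp hkv'.1
  have : q = p := hfst
  subst this
  have : (idxsA cs q).length = 0 := by simpa using hkv'.2
  simpa using List.length_eq_zero_iff.mp this

lemma flatMap_filter_of_nil {α β : Type} (q : α → Bool) (g : α → List β) :
    ∀ (l : List α), (∀ x ∈ l, q x = false → g x = []) →
      (l.filter q).flatMap g = l.flatMap g := by
  intro l
  induction l with
  | nil => simp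
  | cons a l ih =>
    intro h
    by_cases ha : q a = true
    · simp [ha, ih (fun x hx => h x (List.mem_cons_of_mem a hx))]
    · rw [Bool.not_eq_true] at ha
      simp [ha, h a (List.mem_cons_self) ha,
        ih (fun x hx => h x (List.mem_cons_of_mem a hx))]

lemma items_invDict (cs : List Char) : (pvInvDict cs).items = pairsA cs := by
  unfold pvInvDict
  have hstep : ∀ (l : List (List Char × List Nat)) (d : PySem.Dict Nat (List Char)),
      l.foldl (fun d kv => kv.2.foldl (fun d i => d.insert i (convKey kv.1)) d) d
        = (l.flatMap (fun kv => kv.2.map (fun i => (i, convKey kv.1)))).foldl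
            (fun d a => d.insert a.1 a.2) d := by
    intro l d
    rw [List.foldl_flatMap]
    simp only [List.foldl_map]
  rw [hstep]
  have hflat : ((pvCleanDict cs).items.flatMap (fun kv => kv.2.map (fun i => (i, convKey kv.1))))
      = pairsA cs := by
    rw [items_cleanDict]
    rw [flatMap_filter_of_nil _ _ _ (fun x hx hq => by rw [dropped_empty cs hx hq]; rfl)]
    rw [items_searchDict, List.flatMap_map]
    rfl
  rw [hflat]
  have h := PySem.Dict.items_foldl_insert_fresh (pairsA cs) Prod.fst Prod.snd
    (PySem.Dict.empty)
    (fun a _ => PySem.Dict.contains_empty a.1)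
    (by
      -- the inserted positions are pairwise distinct: at most one pattern matches a position
      have hkeys : (pairsA cs).map Prod.fst = pvSearchList.flatMap (fun p => idxsA cs p) := by
        simp [pairsA, List.map_flatMap, List.map_map, Function.comp_def]
      rw [hkeys, List.flatMap]
      rw [List.nodup_flatten]
      constructor
      · intro l hl
        obtain ⟨p, _, rfl⟩ := List.mem_map.mp hl
        exact List.Nodup.filter _ List.nodup_range
      · rw [List.pairwise_map]
        have hne : pvSearchList.Pairwise (fun p q => p ≠ q) := sl_nodup
        refine hne.imp_of_mem ?_
        intro p q hp hq hpq i hip hiq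
        have h1 := (List.mem_filter.mp hip).2
        have h2 := (List.mem_filter.mp hiq).2
        exact hpq (uniq_match hp hq h1 h2))
  simpa using h

-- ---- membership characterisations and order ----

lemma mem_pairsA {cs : List Char} {i : Nat} {v : List Char} :
    (i, v) ∈ pairsA cs ↔
      ∃ p ∈ pvSearchList, i < cs.length ∧
        PySem.Chars.startswith (cs.drop i) p = true ∧ v = convKey p := by
  simp only [pairsA, List.mem_flatMap, List.mem_map, idxsA, List.mem_filter, List.mem_range]
  constructor
  · rintro ⟨p, hp, j, ⟨hj, hs⟩, he⟩
    obtain ⟨rfl, rfl⟩ := Prod.mk.injEq .. ▸ And.intro (congrArg Prod.fst he) (congrArg Prod.snd he)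
    exact ⟨p, hp, hj, hs, rfl⟩
  · rintro ⟨p, hp, hj, hs, rfl⟩
    exact ⟨p, hp, i, ⟨hj, hs⟩, rfl⟩

lemma mem_canonA {cs : List Char} {i : Nat} {v : List Char} :
    (i, v) ∈ canonA cs ↔
      i < cs.length ∧ ∃ c, matchAt (cs.drop i) = some c ∧ v = [c] := by
  simp only [canonA, List.mem_filterMap, List.mem_range, Option.map_eq_some_iff]
  constructor
  · rintro ⟨j, hj, c, hc, he⟩
    have h1 : j = i := congrArg Prod.fst he
    have h2 : [c] = v := congrArg Prod.snd he
    subst h1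
    exact ⟨hj, c, hc, h2.symm⟩
  · rintro ⟨hj, c, hc, rfl⟩
    exact ⟨i, hj, c, hc, rfl⟩

lemma canonA_pairwise (cs : List Char) :
    (canonA cs).Pairwise (fun a b => a.1 < b.1) := by
  unfold canonA
  rw [List.pairwise_filterMap]
  have := List.pairwise_lt_range (n := cs.length)
  refine this.imp_of_mem ?_
  intro a b _ _ hab x hx y hy
  obtain ⟨c, _, rfl⟩ := Option.map_eq_some_iff.mp hx
  obtain ⟨d, _, rfl⟩ := Option.map_eq_some_iff.mp hy
  exact hab

lemma canonA_nodup (cs : List Char) : (canonA cs).Nodup :=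
  (canonA_pairwise cs).imp (fun {a b} h => by intro he; rw [he] at h; exact lt_irrefl _ h)

lemma pairsA_nodup (cs : List Char) : (pairsA cs).Nodup := by
  have hkeys : (pairsA cs).map Prod.fst = pvSearchList.flatMap (fun p => idxsA cs p) := by
    simp [pairsA, List.map_flatMap, List.map_map, Function.comp_def]
  apply List.Nodup.of_map Prod.fst
  rw [hkeys, List.flatMap, List.nodup_flatten]
  constructor
  · intro l hl
    obtain ⟨p, _, rfl⟩ := List.mem_map.mp hl
    exact List.Nodup.filter _ List.nodup_range
  · rw [List.pairwise_map]
    refine (sl_nodup.imp_of_mem ?_ : pvSearchList.Pairwise _)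
    intro p q hp hq hpq i hip hiq
    have h1 := (List.mem_filter.mp hip).2
    have h2 := (List.mem_filter.mp hiq).2
    exact hpq (uniq_match hp hq h1 h2)

lemma canonA_perm_pairsA (cs : List Char) : (canonA cs).Perm (pairsA cs) := by
  rw [List.perm_ext_iff_of_nodup (canonA_nodup cs) (pairsA_nodup cs)]
  rintro ⟨i, v⟩
  rw [mem_canonA, mem_pairsA]
  constructor
  · rintro ⟨hi, c, hc, rfl⟩
    obtain ⟨p, hp, hs, hconv⟩ := matchAt_some hc
    exact ⟨p, hp, hi, hs, hconv.symm⟩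
  · rintro ⟨p, hp, hi, hs, rfl⟩
    obtain ⟨c, hc, hconv⟩ := matchAt_of_match hp hs
    exact ⟨hi, c, hc, hconv⟩

lemma sorted_inv (cs : List Char) :
    PySem.List.sorted (pvInvDict cs).items (fun kv => kv.1) false = canonA cs := by
  rw [items_invDict]
  exact PySem.List.sorted_eq_of_perm_of_pairwise_lt _ _ _
    (canonA_perm_pairsA cs) (canonA_pairwise cs)

-- ---- the scan of B ----

lemma altScan_eq (cs : List Char) :
    altScan cs = (List.range cs.length).filterMap (fun i => matchAt (cs.drop i)) := by
  induction cs with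
  | nil => simp [altScan]
  | cons c rest ih =>
    have htail : (List.range (c :: rest).length).filterMap (fun i => matchAt ((c :: rest).drop i))
        = match matchAt (c :: rest) with
          | some d => d :: (List.range rest.length).filterMap (fun i => matchAt (rest.drop i))
          | none => (List.range rest.length).filterMap (fun i => matchAt (rest.drop i)) := by
      rw [List.length_cons, List.range_succ_eq_map, List.filterMap_cons, List.filterMap_map]
      simp only [List.drop_zero, Function.comp_def, List.drop_succ_cons]
      cases matchAt (c :: rest) <;> simp
    rw [htail]
    by_cases hd : '0' ≤ c ∧ c ≤ '9'
    · simp only [altScan, matchAt, ih]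
      rw [if_pos hd]
      try rw [if_pos hd]
    · simp only [altScan, matchAt, ih]
      rw [if_neg hd]
      try rw [if_neg hd]

-- ---- strip is the identity on a digit string ----

lemma isspace_digit {c : Char} (h1 : '0' ≤ c) (h2 : c ≤ '9') :
    PySem.Chars.isspace c = false := by
  rcases digit_cases c h1 h2 with rfl|rfl|rfl|rfl|rfl|rfl|rfl|rfl|rfl|rfl <;> decide

lemma strip_digits {l : List Char} (h : ∀ c ∈ l, '0' ≤ c ∧ c ≤ '9') :
    PySem.Chars.strip l = l := by
  have hl : PySem.Chars.lstrip l = l := by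
    unfold PySem.Chars.lstrip
    rw [List.dropWhile_eq_self_iff]
    intro hl0
    have hd2 := h _ (List.getElem_mem hl0)
    rw [isspace_digit hd2.1 hd2.2]
    simp
  have hr : PySem.Chars.rstrip l = l := by
    unfold PySem.Chars.rstrip
    have : List.dropWhile PySem.Chars.isspace l.reverse = l.reverse := by
      rw [List.dropWhile_eq_self_iff]
      intro hl0
      have hd2 := h _ (List.mem_reverse.mp (List.getElem_mem hl0))
      rw [isspace_digit hd2.1 hd2.2]
      simp
    rw [this, List.reverse_reverse]
  unfold PySem.Chars.strip
  rw [hl, hr]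

-- ===== VERDICT (by name: the statement is the Claim_ definition above) =====
theorem true_cal_num_spec : Claim_equal_true_cal_num := by
  intro s _
  show true_cal_num s = true_cal_num_alt s
  unfold true_cal_num true_cal_num_alt
  rw [sorted_inv]
  have hmap : (canonA s.toList).map (fun kv => kv.2)
      = ((List.range s.toList.length).filterMap (fun i => matchAt (s.toList.drop i))).map
          (fun c => [c]) := by
    simp [canonA, List.map_filterMap, Option.map_map, Function.comp_def]
  rw [hmap, PySem.Chars.join_nil_singletons, strip_digits, altScan_eq]
  intro c hc
  obtain ⟨i, _, hm⟩ := List.mem_filterMap.mp hc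
  exact matchAt_digit hm
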